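-- pv_equiv track=rewrite | github.com/ajh011/chgcnn | cif2relgraph.py | hedge_packer
-- ===== SOURCE A (Python) =====
-- def hedge_packer(hedge_list):
--     new_hedges = [[],[]]
--     hedge_nodes = []
--     old_hedge = hedge_list[1][0]
--     for idx,(node,hedge) in enumerate(zip(hedge_list[0],hedge_list[1])):
--         new_hedge = hedge_list[1][idx]
--         if new_hedge != old_hedge:
--             new_hedges[0].append(old_hedge)
--             old_hedge = hedge_list[1][idx]
--             new_hedges[1].append(hedge_nodes)
--             hedge_nodes = []
--         hedge_nodes.append(node)
--     new_hedges[0].append(new_hedge)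
--     new_hedges[1].append(hedge_nodes)
--     return new_hedges
-- ===== SOURCE B (Python) =====
-- def hedge_packer(hedge_list):
--     pairs = list(zip(hedge_list[0], hedge_list[1]))
--     ids, groups = [], []
--     while pairs:
--         h = pairs[0][1]
--         k = 0
--         while k < len(pairs) and pairs[k][1] == h:
--             k += 1
--         ids.append(h)
--         groups.append([node for node, _ in pairs[:k]])
--         pairs = pairs[k:]
--     return [ids, groups]
-- ===== Notes on version B (the rewrite author's own statement) =====
-- stated objective: alternative
-- what changed: B splits the zipped (node, hedge) pairs into maximal consecutive runs by an inner scan + slicing, instead of A's single pass that mutates old/new-hedge accumulator state and flushes a pending run on each change.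
import Mathlib
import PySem

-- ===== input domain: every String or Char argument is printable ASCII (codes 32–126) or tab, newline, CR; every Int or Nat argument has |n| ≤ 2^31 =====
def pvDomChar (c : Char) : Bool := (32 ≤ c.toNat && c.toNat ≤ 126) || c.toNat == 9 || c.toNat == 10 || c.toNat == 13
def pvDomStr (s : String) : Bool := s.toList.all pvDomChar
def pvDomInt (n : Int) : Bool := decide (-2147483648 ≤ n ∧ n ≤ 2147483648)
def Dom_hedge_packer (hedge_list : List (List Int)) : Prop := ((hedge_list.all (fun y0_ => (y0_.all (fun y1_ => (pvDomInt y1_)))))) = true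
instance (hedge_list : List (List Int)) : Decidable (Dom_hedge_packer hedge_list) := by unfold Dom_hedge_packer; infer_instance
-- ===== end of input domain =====

-- B replaces A's single pass with mutable old/new-hedge run state by a run-splitting scan
-- (inner scan finds each maximal equal-hedge run, which is sliced off); alternative, same cost.

-- ===== PORT A =====
-- state: (new_hedges[0], new_hedges[1], hedge_nodes, old_hedge, new_hedge as Option — Python's
-- `new_hedge` is unassigned before the first loop iteration; the NameError of the final append
-- when the zip is empty, and the IndexError of hedge_list[1][0], return the dummy ([], [])
-- here and are excluded by Pre_hedge_packer).
def hedgeStepA (hedges : List Int)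
    (st : List Int × List (List Int) × List Int × Int × Option Int)
    (p : Int × (Int × Int)) : List Int × List (List Int) × List Int × Int × Option Int :=
  let (nh0, nh1, hedge_nodes, old_hedge, _) := st
  let (idx, node, _) := p
  let new_hedge := (PySem.List.pyGet? hedges idx).getD 0   -- hedge_list[1][idx]; idx < len hedges, so in range
  if new_hedge ≠ old_hedge then
    (nh0 ++ [old_hedge], nh1 ++ [hedge_nodes], [node], new_hedge, some new_hedge)
  else
    (nh0, nh1, hedge_nodes ++ [node], old_hedge, some new_hedge)

def hedge_packer (hedge_list : List (List Int)) : List Int × List (List Int) :=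
  let nodes := (PySem.List.pyGet? hedge_list 0).getD []
  let hedges := (PySem.List.pyGet? hedge_list 1).getD []
  match PySem.List.pyGet? hedges 0 with
  | none => ([], [])          -- IndexError: hedge_list[1][0]
  | some old0 =>
    let st := (PySem.List.enumerate (List.zip nodes hedges) 0).foldl
      (hedgeStepA hedges) ([], [], ([] : List Int), old0, (none : Option Int))
    match st with
    | (nh0, nh1, hedge_nodes, _, some new_hedge) => (nh0 ++ [new_hedge], nh1 ++ [hedge_nodes])
    | (_, _, _, _, none) => ([], [])   -- NameError: new_hedge never assigned (empty zip)

-- ===== PORT B =====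
-- while pairs: the inner `while k < len(pairs) and pairs[k][1] == h` scan computes the maximal
-- run pairs[:k] sharing the first pair's hedge (takeWhile), and pairs[k:] (dropWhile) remains.
-- fuel = the initial number of pairs bounds the iteration count (it only makes the loop total:
-- each iteration consumes at least one pair, so fuel never runs out on the call below).
def hedgeAltLoop : Nat → List (Int × Int) → List Int → List (List Int) →
    List Int × List (List Int)
  | _, [], ids, groups => (ids, groups)
  | 0, _ :: _, ids, groups => (ids, groups)   -- unreachable: fuel ≥ number of pairs
  | fuel + 1, (node, h) :: rest, ids, groups =>
    hedgeAltLoop fuel (rest.dropWhile (fun p => p.2 == h)) (ids ++ [h])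
      (groups ++ [((node, h) :: rest.takeWhile (fun p => p.2 == h)).map Prod.fst])

def hedge_packer_alt (hedge_list : List (List Int)) : List Int × List (List Int) :=
  let pairs := List.zip ((PySem.List.pyGet? hedge_list 0).getD [])
                        ((PySem.List.pyGet? hedge_list 1).getD [])
  hedgeAltLoop pairs.length pairs [] []

-- ===== PRECONDITION & SPEC =====
-- Pre_ excludes exactly the inputs where the Python A raises: fewer than two member lists
-- (IndexError on hedge_list[1]), empty hedge_list[1] (IndexError on hedge_list[1][0]), or
-- empty hedge_list[0] (empty zip, so NameError on the never-assigned new_hedge).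
def Pre_hedge_packer (hedge_list : List (List Int)) : Prop :=
  2 ≤ hedge_list.length ∧ hedge_list.getD 0 [] ≠ [] ∧ hedge_list.getD 1 [] ≠ []
instance (hedge_list : List (List Int)) : Decidable (Pre_hedge_packer hedge_list) := by
  unfold Pre_hedge_packer; infer_instance

def pvWitness_hedge_packer : List (List Int) := [[10, 11, 12, 13], [0, 0, 1, 2]]

def Spec_hedge_packer (hedge_list : List (List Int)) (out : List Int × List (List Int)) : Prop :=
  out = hedge_packer_alt hedge_list
instance (hedge_list : List (List Int)) (out : List Int × List (List Int)) :
    Decidable (Spec_hedge_packer hedge_list out) := by unfold Spec_hedge_packer; infer_instance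

-- ===== CLAIM (what is proved, stated in full; the proofs are below) =====
def Claim_equal_hedge_packer : Prop := ∀ (hedge_list : List (List Int)), Dom_hedge_packer hedge_list → Pre_hedge_packer hedge_list → Spec_hedge_packer hedge_list (hedge_packer hedge_list)

-- ===== LEMMAS AND PROOFS =====

-- Abstract version of A's fold step: the hedge of the pair itself replaces the
-- hedge_list[1][idx] lookup (they coincide on the zipped, enumerated list).
def hedgeStepAbs (st : List Int × List (List Int) × List Int × Int × Option Int)
    (p : Int × Int) : List Int × List (List Int) × List Int × Int × Option Int :=
  let (nh0, nh1, hedge_nodes, old_hedge, _) := st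
  if p.2 ≠ old_hedge then
    (nh0 ++ [old_hedge], nh1 ++ [hedge_nodes], [p.1], p.2, some p.2)
  else
    (nh0, nh1, hedge_nodes ++ [p.1], old_hedge, some p.2)

-- Bridge: the enumerated fold with the pyGet lookup equals the abstract fold,
-- provided the lookup at each enumerated index returns the pair's own hedge.
theorem hedge_fold_bridge (hedges : List Int) :
    ∀ (l : List (Int × Int)) (s : Int)
      (st : List Int × List (List Int) × List Int × Int × Option Int),
      (∀ j : Nat, (hj : j < l.length) →
        (PySem.List.pyGet? hedges (s + j)).getD 0 = (l[j]'hj).2) →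
      (PySem.List.enumerate l s).foldl (hedgeStepA hedges) st = l.foldl hedgeStepAbs st := by
  intro l
  induction l with
  | nil => intro s st _; simp [PySem.List.enumerate]
  | cons p rest ih =>
    intro s st h
    have h0 : (PySem.List.pyGet? hedges s).getD 0 = p.2 := by
      have := h 0 (by simp)
      simpa using this
    rw [PySem.List.enumerate_cons]
    simp only [List.foldl_cons]
    have hstep : hedgeStepA hedges st (s, p) = hedgeStepAbs st p := by
      obtain ⟨nh0, nh1, hn, oh, o⟩ := st
      obtain ⟨pn, ph⟩ := p
      simp only [hedgeStepA, hedgeStepAbs] at *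
      rw [h0]
    rw [hstep]
    apply ih
    intro j hj
    have := h (j + 1) (by simpa using Nat.succ_lt_succ hj)
    simpa [add_assoc, add_comm 1 (j : Int)] using this

-- Finishing A's fold from an "open run" state (ids done, groups done, current run nodes cur,
-- current hedge h, option = some h) equals B's loop continued past the rest of that run.
theorem hedge_run_inv :
    ∀ (pairs : List (Int × Int)) (fuel : Nat) (ids : List Int) (groups : List (List Int))
      (cur : List Int) (h : Int), pairs.length ≤ fuel →
      (match pairs.foldl hedgeStepAbs (ids, groups, cur, h, some h) with
       | (nh0, nh1, hn, _, some nh) => (nh0 ++ [nh], nh1 ++ [hn])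
       | (_, _, _, _, none) => (([] : List Int), ([] : List (List Int)))) =
      hedgeAltLoop fuel (pairs.dropWhile (fun p => p.2 == h)) (ids ++ [h])
        (groups ++ [cur ++ (pairs.takeWhile (fun p => p.2 == h)).map Prod.fst]) := by
  intro pairs
  induction pairs with
  | nil => intro fuel ids groups cur h _; simp [hedgeAltLoop]
  | cons p rest ih =>
    intro fuel ids groups cur h hfuel
    obtain ⟨pn, ph⟩ := p
    rw [List.foldl_cons]
    by_cases hph : ph = h
    · subst hph
      have hs : hedgeStepAbs (ids, groups, cur, ph, some ph) (pn, ph) =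
          (ids, groups, cur ++ [pn], ph, some ph) := by simp [hedgeStepAbs]
      rw [hs, ih fuel ids groups (cur ++ [pn]) ph (by simpa using Nat.le_of_succ_le hfuel)]
      simp
    · have hs : hedgeStepAbs (ids, groups, cur, h, some h) (pn, ph) =
          (ids ++ [h], groups ++ [cur], [pn], ph, some ph) := by
        simp [hedgeStepAbs, hph]
      obtain ⟨f, rfl⟩ : ∃ f, fuel = f + 1 := by
        cases fuel with
        | zero => simp at hfuel
        | succ f => exact ⟨f, rfl⟩
      rw [hs, ih f (ids ++ [h]) (groups ++ [cur]) [pn] ph (by simpa using Nat.le_of_succ_le_succ hfuel)]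
      rw [List.dropWhile_cons, List.takeWhile_cons]
      simp only [show (ph == h) = false by simp [hph], Bool.false_eq_true, if_false]
      simp [hedgeAltLoop, List.append_assoc]

-- ===== VERDICT (by name: the statement is the Claim_ definition above) =====
theorem hedge_packer_spec : Claim_equal_hedge_packer := by
  intro hedge_list _dom pre
  obtain ⟨hlen, hne0, hne1⟩ := pre
  rcases hedge_list with _ | ⟨a, rest0⟩
  · simp at hlen
  rcases rest0 with _ | ⟨b, l⟩
  · simp at hlen
  have ha : a ≠ [] := by simpa using hne0
  have hb : b ≠ [] := by simpa using hne1
  obtain ⟨n0, ns, rfl⟩ := List.exists_cons_of_ne_nil ha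
  obtain ⟨h0, hs, rfl⟩ := List.exists_cons_of_ne_nil hb
  have hg0 : PySem.List.pyGet? ((n0 :: ns) :: (h0 :: hs) :: l) 0 = some (n0 :: ns) :=
    PySem.List.pyGet?_zero_cons _ _
  have hg1 : PySem.List.pyGet? ((n0 :: ns) :: (h0 :: hs) :: l) 1 = some (h0 :: hs) := by
    rw [show (1 : Int) = ((0 : Nat) : Int) + 1 by norm_num, PySem.List.pyGet?_cons_succ]
    simp
  unfold Spec_hedge_packer hedge_packer hedge_packer_alt
  simp only [hg0, hg1, Option.getD_some, PySem.List.pyGet?_zero_cons]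
  have hzip : List.zip (n0 :: ns) (h0 :: hs) = (n0, h0) :: List.zip ns hs := rfl
  rw [hedge_fold_bridge (h0 :: hs) (List.zip (n0 :: ns) (h0 :: hs)) 0 _ ?_]
  · rw [hzip, List.foldl_cons]
    have hfirst : hedgeStepAbs ([], [], ([] : List Int), h0, (none : Option Int)) (n0, h0) =
        ([], [], [n0], h0, some h0) := by simp [hedgeStepAbs]
    rw [hfirst,
      hedge_run_inv (List.zip ns hs) (List.zip ns hs).length [] [] [n0] h0 (le_refl _)]
    rw [List.length_cons, hedgeAltLoop]
    simp
  · -- lookup condition: hedges[0 + j] is the j-th zipped hedge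
    intro j hj
    have hjh : j < (h0 :: hs).length := lt_of_lt_of_le hj (by simp [List.length_zip])
    rw [show ((0 : Int) + (j : Int)) = ((j : Nat) : Int) by simp, PySem.List.pyGet?_natCast,
      List.getElem?_eq_getElem hjh]
    cases j with
    | zero => simp
    | succ j => simp [List.getElem_zip]
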